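-- pv_equiv track=rewrite | github.com/mujtaba-a-khan/adv-multiagent-framework | src/adversarial_framework/strategies/parsing.py | _inject_reasoning_context
-- ===== SOURCE A (Python) =====
-- def _inject_reasoning_context(
--     messages: list[dict[str, str]],
--     reasoning: str,
-- ) -> list[dict[str, str]]:
--     """Insert reasoning as an assistant message before the final user message.
--
--     This gives the model continuity: it "remembers" its own analysis when
--     generating the clean attack prompt.
--     """
--     if not messages:
--         return [{"role": "assistant", "content": reasoning}]
--
--     # Find the last user message and insert assistant reasoning before it.
--     result: list[dict[str, str]] = []
--     inserted = False
--     for msg in reversed(messages):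
--         if msg["role"] == "user" and not inserted:
--             # Insert reasoning before this (the last) user message
--             result.append(msg)
--             result.append({"role": "assistant", "content": reasoning})
--             inserted = True
--         else:
--             result.append(msg)
--
--     # Reverse back to original order
--     result.reverse()
--
--     if not inserted:
--         # No user message found — just append reasoning at the end
--         result.append({"role": "assistant", "content": reasoning})
--
--     return result
-- ===== SOURCE B (Python) =====
-- def _inject_reasoning_context(
--     messages: list[dict[str, str]],
--     reasoning: str,
-- ) -> list[dict[str, str]]:
--     """Insert reasoning as an assistant message before the final user message."""
--     note = {"role": "assistant", "content": reasoning}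
--     idx = None
--     for i, msg in enumerate(messages):
--         if msg["role"] == "user":
--             idx = i
--     if not messages:
--         return [note]
--     if idx is None:
--         return list(messages) + [note]
--     return messages[:idx] + [note] + messages[idx:]
-- ===== Notes on version B (the rewrite author's own statement) =====
-- stated objective: simpler
-- what changed: Replaces A's reverse-iterate-with-inserted-flag-then-reverse-back loop by a forward scan for the last 'user' index followed by a single slice-splice, reusing the original dicts.
import Mathlib
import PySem

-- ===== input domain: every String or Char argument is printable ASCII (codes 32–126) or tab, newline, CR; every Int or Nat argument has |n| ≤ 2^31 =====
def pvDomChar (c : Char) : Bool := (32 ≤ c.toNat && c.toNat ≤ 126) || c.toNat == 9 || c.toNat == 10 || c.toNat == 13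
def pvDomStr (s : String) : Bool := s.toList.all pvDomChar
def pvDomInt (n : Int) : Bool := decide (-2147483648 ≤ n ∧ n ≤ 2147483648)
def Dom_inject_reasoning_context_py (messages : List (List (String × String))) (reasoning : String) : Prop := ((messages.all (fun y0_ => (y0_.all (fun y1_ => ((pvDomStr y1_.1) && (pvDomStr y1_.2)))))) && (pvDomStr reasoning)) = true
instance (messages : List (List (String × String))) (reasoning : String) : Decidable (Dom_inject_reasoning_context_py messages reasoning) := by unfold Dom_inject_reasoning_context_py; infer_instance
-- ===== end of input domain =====

-- B replaces A's reverse-scan-with-flag-then-reverse-back by a forward scan for the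
-- last 'user' index plus one slice-splice (simpler; return value only, neither mutates).

-- msg["role"]: first-match association-list lookup; Pre_ guarantees the key is present,
-- so the .getD "" default is never reached on admitted inputs.
def pvRole (msg : List (String × String)) : String :=
  ((PySem.Dict.mk msg).get? "role").getD ""

-- the {"role": "assistant", "content": reasoning} dict both Pythons build
def pvNote (reasoning : String) : List (String × String) :=
  [("role", "assistant"), ("content", reasoning)]

-- ===== PORT A =====
def inject_reasoning_context_py (messages : List (List (String × String))) (reasoning : String) : List (List (String × String)) :=
  if messages = [] then [pvNote reasoning]
  else
    let st := messages.reverse.foldl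
      (fun (st : List (List (String × String)) × Bool) msg =>
        if pvRole msg == "user" && !st.2 then
          (st.1 ++ [msg, pvNote reasoning], true)
        else
          (st.1 ++ [msg], st.2))
      ([], false)
    let result := st.1.reverse
    if !st.2 then result ++ [pvNote reasoning] else result

-- ===== PORT B =====
-- enumerate indices are ≥ 0, so messages[:idx]/messages[idx:] are exactly take/drop idx.toNat
def inject_reasoning_context_py_alt (messages : List (List (String × String))) (reasoning : String) : List (List (String × String)) :=
  let note := pvNote reasoning
  let idx := (PySem.List.enumerate messages).foldl
    (fun (acc : Option Int) (p : Int × List (String × String)) =>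
      if pvRole p.2 == "user" then some p.1 else acc) none
  if messages = [] then [note]
  else
    match idx with
    | none => messages ++ [note]
    | some i => messages.take i.toNat ++ [note] ++ messages.drop i.toNat

-- ===== PRECONDITION & SPEC =====
-- Pre_ excludes exactly the inputs on which Python A raises KeyError: a nonempty
-- messages list containing a dict without the "role" key (B raises there too).
def Pre_inject_reasoning_context_py (messages : List (List (String × String))) (reasoning : String) : Prop :=
  messages.all (fun m => (PySem.Dict.mk m).contains "role") = true
instance (messages : List (List (String × String))) (reasoning : String) : Decidable (Pre_inject_reasoning_context_py messages reasoning) := by unfold Pre_inject_reasoning_context_py; infer_instance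
def pvWitness_inject_reasoning_context_py : (List (List (String × String))) × String :=
  ([[("role", "user"), ("content", "hi")]], "because")

def Spec_inject_reasoning_context_py (messages : List (List (String × String))) (reasoning : String) (out : List (List (String × String))) : Prop := out = inject_reasoning_context_py_alt messages reasoning
instance (messages : List (List (String × String))) (reasoning : String) (out : List (List (String × String))) : Decidable (Spec_inject_reasoning_context_py messages reasoning out) := by unfold Spec_inject_reasoning_context_py; infer_instance

-- ===== CLAIM (what is proved, stated in full; the proofs are below) =====
def Claim_equal_inject_reasoning_context_py : Prop := ∀ (messages : List (List (String × String))) (reasoning : String), Dom_inject_reasoning_context_py messages reasoning → Pre_inject_reasoning_context_py messages reasoning → Spec_inject_reasoning_context_py messages reasoning (inject_reasoning_context_py messages reasoning)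

-- ===== LEMMAS AND PROOFS =====

-- A's loop step
def pvStepA (reasoning : String) (st : List (List (String × String)) × Bool) (msg : List (String × String)) : List (List (String × String)) × Bool :=
  if pvRole msg == "user" && !st.2 then (st.1 ++ [msg, pvNote reasoning], true)
  else (st.1 ++ [msg], st.2)

-- structural characterisation of A's loop: insert the note after the first user (of the reversed list)
def pvIns (reasoning : String) : List (List (String × String)) → List (List (String × String)) × Bool
  | [] => ([], false)
  | m :: l =>
    if pvRole m == "user" then (m :: pvNote reasoning :: l, true)
    else
      let p := pvIns reasoning l
      (m :: p.1, p.2)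

-- B's last-user-index loop
def pvLastIdx (messages : List (List (String × String))) : Option Int :=
  (PySem.List.enumerate messages).foldl
    (fun (acc : Option Int) (p : Int × List (String × String)) =>
      if pvRole p.2 == "user" then some p.1 else acc) none

theorem pvStepA_absorb (r : String) (l : List (List (String × String))) (pre : List (List (String × String))) :
    l.foldl (pvStepA r) (pre, true) = (pre ++ l, true) := by
  induction l generalizing pre with
  | nil => simp
  | cons m l ih => simp [pvStepA, ih]

theorem pvFoldA_eq_ins (r : String) (l : List (List (String × String))) (pre : List (List (String × String))) :
    l.foldl (pvStepA r) (pre, false) = (pre ++ (pvIns r l).1, (pvIns r l).2) := by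
  induction l generalizing pre with
  | nil => simp [pvIns]
  | cons m l ih =>
    by_cases h : pvRole m == "user"
    · simp [pvStepA, pvIns, h, pvStepA_absorb]
    · have hs : pvStepA r (pre, false) m = (pre ++ [m], false) := by
        simp [pvStepA, h]
      rw [List.foldl_cons, hs, ih]
      simp [pvIns, h]

theorem pvLastIdx_snoc (ms : List (List (String × String))) (m : List (String × String)) :
    pvLastIdx (ms ++ [m]) =
      (if pvRole m == "user" then some (ms.length : Int) else pvLastIdx ms) := by
  unfold pvLastIdx
  rw [PySem.List.enumerate_append]
  simp [PySem.List.enumerate]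

theorem pvMain_aux (r : String) (ms : List (List (String × String))) :
    (pvLastIdx ms = none → pvIns r ms.reverse = (ms.reverse, false)) ∧
    (∀ i, pvLastIdx ms = some i → 0 ≤ i ∧ i < (ms.length : Int) ∧
      (pvIns r ms.reverse).1 = (ms.take i.toNat ++ pvNote r :: ms.drop i.toNat).reverse ∧
      (pvIns r ms.reverse).2 = true) := by
  induction ms using List.reverseRecOn with
  | nil =>
    constructor
    · intro _; simp [pvIns]
    · intro i h; simp [pvLastIdx, PySem.List.enumerate] at h
  | append_singleton ms m ih =>
    rw [pvLastIdx_snoc]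
    by_cases h : pvRole m == "user"
    · constructor
      · intro hn; rw [if_pos h] at hn; exact absurd hn (by simp)
      · intro i hi
        rw [if_pos h] at hi
        injection hi with hi; subst hi
        refine ⟨by positivity, by simp, ?_, ?_⟩
        · simp [pvIns, h]
        · simp [pvIns, h]
    · rw [if_neg h]
      constructor
      · intro hn
        simp [pvIns, h, (ih.1 hn)]
      · intro i hi
        obtain ⟨h0, hlt, heq, hflag⟩ := ih.2 i hi
        have hle : i.toNat ≤ ms.length := by omega
        refine ⟨h0, by simp; omega, ?_, ?_⟩
        · simp [pvIns, h, heq, List.take_append_of_le_length hle,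
            List.drop_append_of_le_length hle]
        · simp [pvIns, h, hflag]

-- ===== VERDICT (by name: the statement is the Claim_ definition above) =====
theorem inject_reasoning_context_py_spec : Claim_equal_inject_reasoning_context_py := by
  intro messages reasoning _ _
  unfold Spec_inject_reasoning_context_py
  unfold inject_reasoning_context_py inject_reasoning_context_py_alt
  by_cases hnil : messages = []
  · simp [hnil]
  · rw [if_neg hnil, if_neg hnil]
    have hfold : messages.reverse.foldl
        (fun (st : List (List (String × String)) × Bool) msg =>
          if pvRole msg == "user" && !st.2 then (st.1 ++ [msg, pvNote reasoning], true)
          else (st.1 ++ [msg], st.2)) ([], false)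
        = ((pvIns reasoning messages.reverse).1, (pvIns reasoning messages.reverse).2) := by
      have := pvFoldA_eq_ins reasoning messages.reverse []
      simpa [pvStepA] using this
    rw [hfold]
    rcases hidx : pvLastIdx messages with _ | i
    · have h1 := (pvMain_aux reasoning messages).1 hidx
      rw [h1]
      simp only [pvLastIdx] at hidx
      simp only [hidx]
      simp
    · obtain ⟨h0, hlt, heq, hflag⟩ := (pvMain_aux reasoning messages).2 i hidx
      rw [heq, hflag]
      simp only [pvLastIdx] at hidx
      simp only [hidx]
      simp
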